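-- pv_equiv track=rewrite | github.com/viresh29/Python | scripts/s3_filter.py | hour_summary
-- ===== SOURCE A (Python) =====
-- def hour_summary(l):
--     d = dict()
--     for key, size in l:
--         k = key[:32]
--         if k in d:
--             d[k] += size
--         else:
--             d[k] = size
--     return d
-- ===== SOURCE B (Python) =====
-- def hour_summary(l):
--     prefixes = list(dict.fromkeys(key[:32] for key, _ in l))
--     return {p: sum(size for key, size in l if key[:32] == p) for p in prefixes}
-- ===== Notes on version B (the rewrite author's own statement) =====
-- stated objective: alternative
-- what changed: Replaces the single-pass dict accumulation with a two-phase decomposition: first collect the distinct 32-char prefixes in first-occurrence order, then build the result by a comprehension that sums the sizes matching each prefix in a separate scan.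
import Mathlib
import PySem

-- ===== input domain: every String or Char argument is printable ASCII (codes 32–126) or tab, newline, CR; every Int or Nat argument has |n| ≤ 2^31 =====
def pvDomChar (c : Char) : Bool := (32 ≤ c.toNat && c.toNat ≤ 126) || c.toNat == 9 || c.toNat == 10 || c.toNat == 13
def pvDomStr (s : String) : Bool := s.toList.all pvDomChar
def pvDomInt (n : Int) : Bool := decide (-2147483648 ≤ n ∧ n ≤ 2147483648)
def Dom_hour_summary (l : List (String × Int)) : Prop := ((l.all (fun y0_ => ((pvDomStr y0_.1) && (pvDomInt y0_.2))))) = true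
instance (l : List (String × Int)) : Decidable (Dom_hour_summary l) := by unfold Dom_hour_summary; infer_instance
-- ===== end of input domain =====

-- B replaces A's single-pass dict accumulation by a two-phase decomposition (dedup the
-- 32-char prefixes in first-occurrence order, then sum the matching sizes per prefix);
-- same result, no speed claim.

-- key[:32] (both Pythons write this expression)
def hsPref (s : String) : String := PySem.Str.slice s none (some 32)

-- ===== PORT A =====
def hour_summary (l : List (String × Int)) : List (String × Int) :=
  (l.foldl (fun d kv =>
      let k := hsPref kv.1
      if d.contains k then d.insert k (d.getD k 0 + kv.2)
      else d.insert k kv.2) PySem.Dict.empty).items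

-- ===== PORT B =====
def hour_summary_alt (l : List (String × Int)) : List (String × Int) :=
  let prefixes := PySem.List.dedup (l.map (fun kv => hsPref kv.1))
  prefixes.map (fun p => (p, ((l.filter (fun kv => hsPref kv.1 == p)).map (fun kv => kv.2)).sum))

-- ===== PRECONDITION & SPEC =====
def Spec_hour_summary (l : List (String × Int)) (out : List (String × Int)) : Prop := out = hour_summary_alt l
instance (l : List (String × Int)) (out : List (String × Int)) : Decidable (Spec_hour_summary l out) := by unfold Spec_hour_summary; infer_instance

-- ===== CLAIM (what is proved, stated in full; the proofs are below) =====
def Claim_equal_hour_summary : Prop := ∀ (l : List (String × Int)), Dom_hour_summary l → Spec_hour_summary l (hour_summary l)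

-- ===== LEMMAS AND PROOFS =====

-- the per-prefix sum B computes
def hsSum (f : String × Int → String) (l : List (String × Int)) (p : String) : Int :=
  ((l.filter (fun kv => f kv == p)).map (fun kv => kv.2)).sum

-- A's branching step is the uniform "insert getD+size" step
lemma hs_step_uniform (f : String × Int → String) (d : PySem.Dict String Int) (kv : String × Int) :
    (if d.contains (f kv) then d.insert (f kv) (d.getD (f kv) 0 + kv.2) else d.insert (f kv) kv.2)
      = d.insert (f kv) (d.getD (f kv) 0 + kv.2) := by
  by_cases h : d.contains (f kv) = true
  · simp [h]
  · simp only [Bool.not_eq_true] at h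
    simp [h, PySem.Dict.getD_of_not_contains d 0 h]

-- per-prefix sum after appending one pair
lemma hsSum_append (f : String × Int → String) (l : List (String × Int)) (x : String × Int) (p : String) :
    hsSum f (l ++ [x]) p = hsSum f l p + (if f x == p then x.2 else 0) := by
  by_cases h : f x = p <;> simp [hsSum, List.filter_append, h]

-- characterisation of A's accumulation loop: items = distinct keys (first occurrence) paired with sums
lemma hs_fold_items (f : String × Int → String) (l : List (String × Int)) :
    (l.foldl (fun d kv => d.insert (f kv) (d.getD (f kv) 0 + kv.2)) PySem.Dict.empty).items
      = (PySem.Set.ofList (l.map f)).map (fun p => (p, hsSum f l p)) := by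
  induction l using List.reverseRecOn with
  | nil => rfl
  | append_singleton l x ih =>
    rw [List.foldl_append]
    set G := l.foldl (fun d kv => d.insert (f kv) (d.getD (f kv) 0 + kv.2)) PySem.Dict.empty with hG
    have hkeys : G.keys = PySem.Set.ofList (l.map f) := by
      simp [PySem.Dict.keys, ih, Function.comp_def]
    have hnd : G.keys.Nodup := by rw [hkeys]; exact PySem.Set.nodup_ofList _
    have hofl : PySem.Set.ofList ((l ++ [x]).map f)
        = PySem.Set.add (PySem.Set.ofList (l.map f)) (f x) := by
      simp [PySem.Set.ofList_eq_foldl, List.map_append, List.foldl_append]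
    simp only [List.foldl_cons, List.foldl_nil]
    by_cases hm : f x ∈ l.map f
    · have hc : G.contains (f x) = true := by
        rw [PySem.Dict.contains_eq_decide_mem_keys, hkeys]
        simp [PySem.Set.mem_ofList, hm]
      have hget : G.getD (f x) 0 = hsSum f l (f x) := by
        refine PySem.Dict.getD_of_mem_items G ?_ hnd 0
        rw [ih]
        exact List.mem_map_of_mem ((PySem.Set.mem_ofList (l.map f) (f x)).2 hm)
      have hadd : PySem.Set.add (PySem.Set.ofList (l.map f)) (f x) = PySem.Set.ofList (l.map f) := by
        simp [PySem.Set.add, PySem.Set.contains, (PySem.Set.mem_ofList (l.map f) (f x)).2 hm]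
      rw [PySem.Dict.items_insert_of_contains G _ hc, ih, hofl, hadd, List.map_map]
      refine List.map_congr_left ?_
      intro p hp
      by_cases hpe : p = f x
      · simp [Function.comp, hpe, hsSum_append, hget]
      · simp [Function.comp, hpe, hsSum_append, Ne.symm hpe]
    · have hc : G.contains (f x) = false := by
        rw [PySem.Dict.contains_eq_decide_mem_keys, hkeys]
        simp [PySem.Set.mem_ofList, hm]
      have hadd : PySem.Set.add (PySem.Set.ofList (l.map f)) (f x)
          = PySem.Set.ofList (l.map f) ++ [f x] := by
        have : ¬ f x ∈ PySem.Set.ofList (l.map f) := by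
          rw [PySem.Set.mem_ofList]; exact hm
        simp [PySem.Set.add, PySem.Set.contains, this]
      have hzero : hsSum f l (f x) = 0 := by
        have : l.filter (fun kv => f kv == f x) = [] := by
          rw [List.filter_eq_nil_iff]
          intro kv hkv
          simp only [beq_iff_eq]
          intro he
          exact hm (he ▸ List.mem_map_of_mem hkv)
        simp [hsSum, this]
      rw [PySem.Dict.items_insert_of_not_contains G _ hc,
          PySem.Dict.getD_of_not_contains G 0 hc, ih, hofl, hadd, List.map_append]
      congr 1
      · refine List.map_congr_left ?_
        intro p hp
        have hne : f x ≠ p := fun he => hm (he ▸ ((PySem.Set.mem_ofList (l.map f) p).1 hp))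
        simp [hsSum_append, hne]
      · simp [hsSum_append, hzero]

-- ===== VERDICT (by name: the statement is the Claim_ definition above) =====
theorem hour_summary_spec : Claim_equal_hour_summary := by
  intro l _
  unfold Spec_hour_summary hour_summary hour_summary_alt
  show (l.foldl (fun d kv =>
      if d.contains (hsPref kv.1) then d.insert (hsPref kv.1) (d.getD (hsPref kv.1) 0 + kv.2)
      else d.insert (hsPref kv.1) kv.2) PySem.Dict.empty).items = _
  rw [PySem.List.foldl_congr_mem l _ _ _
      (fun d kv _ => hs_step_uniform (fun kv => hsPref kv.1) d kv)]
  rw [hs_fold_items (fun kv => hsPref kv.1) l]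
  simp [hsSum, PySem.List.dedup_eq_ofList]
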